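-- pv_equiv track=rewrite | github.com/liusuan110/LabGuardian-Server | app/pipeline/stages/s2_mapping.py | _view_ids_from_images
-- ===== SOURCE A (Python) =====
-- from typing import Any, Dict, List, Optional, Tuple
--
-- def _view_ids_from_images(images_b64: List[str] | None) -> List[str]:
--     if not images_b64:
--         return ["top"]
--     defaults = ["top", "left_front", "right_front"]
--     view_ids = defaults[: len(images_b64)]
--     if len(images_b64) > len(defaults):
--         for idx in range(len(defaults), len(images_b64)):
--             view_ids.append(f"aux_view_{idx - len(defaults) + 1}")
--     return view_ids
-- ===== SOURCE B (Python) =====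
-- def _view_ids_from_images(images_b64):
--     if not images_b64:
--         return ["top"]
--     pool = ["top", "left_front", "right_front"]
--     labels = []
--     k = 1
--     for _ in images_b64:
--         if pool:
--             labels.append(pool.pop(0))
--         else:
--             labels.append("aux_view_%d" % k)
--             k += 1
--     return labels
-- ===== Notes on version B (the rewrite author's own statement) =====
-- stated objective: alternative
-- what changed: Replaces A's index arithmetic (slice of defaults plus an index-range loop appending aux labels) with a structural recursion that walks the image list, consuming a pool of default ids and switching to a running aux counter once the pool is empty; no indices or ranges are used.
import Mathlib
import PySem

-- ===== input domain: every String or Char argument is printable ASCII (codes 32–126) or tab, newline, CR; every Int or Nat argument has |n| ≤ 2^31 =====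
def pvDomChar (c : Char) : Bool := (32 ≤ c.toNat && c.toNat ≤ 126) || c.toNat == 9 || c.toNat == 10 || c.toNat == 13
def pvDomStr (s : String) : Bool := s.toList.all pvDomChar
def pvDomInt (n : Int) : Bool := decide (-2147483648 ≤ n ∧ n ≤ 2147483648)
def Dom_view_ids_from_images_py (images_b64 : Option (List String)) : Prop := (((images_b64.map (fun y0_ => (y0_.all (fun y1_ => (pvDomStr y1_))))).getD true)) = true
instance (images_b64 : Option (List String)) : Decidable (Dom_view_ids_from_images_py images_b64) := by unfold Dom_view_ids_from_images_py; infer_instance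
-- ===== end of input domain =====

-- B replaces A's slice-plus-index-range loop with a single pass over the images
-- that pops a pool of default ids and then counts aux labels with a running
-- counter (no index arithmetic); same O(n) cost, a different decomposition.

-- ===== PORT A =====
def view_ids_from_images_py (images_b64 : Option (List String)) : List String :=
  match images_b64 with
  | none => ["top"]
  | some imgs =>
    if imgs.length = 0 then ["top"]
    else
      let defaults : List String := ["top", "left_front", "right_front"]
      let view_ids := PySem.List.slice defaults none (some (imgs.length : Int))
      if (imgs.length : Int) > (defaults.length : Int) then
        (PySem.List.pyRange (defaults.length : Int) (imgs.length : Int) 1).foldl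
          (fun acc idx => acc ++ ["aux_view_" ++ PySem.Int.toStr (idx - (defaults.length : Int) + 1)])
          view_ids
      else view_ids

-- ===== PORT B =====
-- Source B's loop: one step per image, popping the defaults pool, else a running aux counter
def pvStepB (st : List String × Int × List String) : List String × Int × List String :=
  match st with
  | (p :: ps, k, labels) => (ps, k, labels ++ [p])
  | ([], k, labels) => ([], k + 1, labels ++ ["aux_view_" ++ PySem.Int.toStr k])

def view_ids_from_images_py_alt (images_b64 : Option (List String)) : List String :=
  match images_b64 with
  | none => ["top"]
  | some imgs =>
    if imgs.length = 0 then ["top"]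
    else (imgs.foldl (fun st _ => pvStepB st) (["top", "left_front", "right_front"], 1, [])).2.2

-- ===== PRECONDITION & SPEC =====
def Spec_view_ids_from_images_py (images_b64 : Option (List String)) (out : List String) : Prop := out = view_ids_from_images_py_alt images_b64
instance (images_b64 : Option (List String)) (out : List String) : Decidable (Spec_view_ids_from_images_py images_b64 out) := by unfold Spec_view_ids_from_images_py; infer_instance

-- ===== CLAIM (what is proved, stated in full; the proofs are below) =====
def Claim_equal_view_ids_from_images_py : Prop := ∀ (images_b64 : Option (List String)), Dom_view_ids_from_images_py images_b64 → Spec_view_ids_from_images_py images_b64 (view_ids_from_images_py images_b64)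

-- ===== LEMMAS AND PROOFS =====

-- Both sides depend on the image list only through its length.
def pvA (n : Nat) : List String :=
  let defaults : List String := ["top", "left_front", "right_front"]
  let view_ids := PySem.List.slice defaults none (some (n : Int))
  if (n : Int) > (defaults.length : Int) then
    (PySem.List.pyRange (defaults.length : Int) (n : Int) 1).foldl
      (fun acc idx => acc ++ ["aux_view_" ++ PySem.Int.toStr (idx - (defaults.length : Int) + 1)])
      view_ids
  else view_ids

def pvW : Nat → List String → Int → List String
  | 0, _, _ => []
  | n + 1, p :: ps, k => p :: pvW n ps k
  | n + 1, [], k => ("aux_view_" ++ PySem.Int.toStr k) :: pvW n [] (k + 1)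

lemma pvFold_eq_pvW (imgs : List String) : ∀ (pool : List String) (k : Int) (acc : List String),
    (imgs.foldl (fun st _ => pvStepB st) (pool, k, acc)).2.2 = acc ++ pvW imgs.length pool k := by
  induction imgs with
  | nil => intro pool k acc; simp [pvW]
  | cons x xs ih =>
    intro pool k acc
    cases pool with
    | nil =>
      have h : ((x :: xs).foldl (fun st _ => pvStepB st) ([], k, acc)).2.2
          = (xs.foldl (fun st _ => pvStepB st) ([], k + 1, acc ++ ["aux_view_" ++ PySem.Int.toStr k])).2.2 := rfl
      rw [h, ih]
      simp [pvW]
    | cons p ps =>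
      have h : ((x :: xs).foldl (fun st _ => pvStepB st) (p :: ps, k, acc)).2.2
          = (xs.foldl (fun st _ => pvStepB st) (ps, k, acc ++ [p])).2.2 := rfl
      rw [h, ih]
      simp [pvW]

lemma pvW_nil_snoc (n : Nat) : ∀ (k : Int),
    pvW (n + 1) [] k = pvW n [] k ++ ["aux_view_" ++ PySem.Int.toStr (k + n)] := by
  induction n with
  | zero => intro k; simp [pvW]
  | succ m ih =>
    intro k
    have : pvW (m + 1 + 1) [] k = ("aux_view_" ++ PySem.Int.toStr k) :: pvW (m + 1) [] (k + 1) := rfl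
    rw [this, ih (k + 1)]
    have : pvW (m + 1) [] k = ("aux_view_" ++ PySem.Int.toStr k) :: pvW m [] (k + 1) := rfl
    rw [this]
    have : k + 1 + (m : Int) = k + ((m : Nat) + 1 : Nat) := by push_cast; ring
    rw [this]
    simp

def pvB (n : Nat) : List String := pvW n ["top", "left_front", "right_front"] 1

lemma pvB_snoc (m : Nat) (hm : 3 ≤ m) :
    pvB (m + 1) = pvB m ++ ["aux_view_" ++ PySem.Int.toStr ((m : Int) - 3 + 1)] := by
  obtain ⟨j, rfl⟩ : ∃ j, m = j + 3 := ⟨m - 3, by omega⟩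
  have h1 : pvB (j + 3 + 1) = "top" :: "left_front" :: "right_front" :: pvW (j + 1) [] 1 := rfl
  have h2 : pvB (j + 3) = "top" :: "left_front" :: "right_front" :: pvW j [] 1 := rfl
  rw [h1, h2, pvW_nil_snoc j 1]
  have : (1 : Int) + (j : Nat) = ((j : Nat) + 3 : Nat) - 3 + 1 := by push_cast; ring
  rw [this]
  simp

lemma pvA_eq_pvB (n : Nat) : pvA n = pvB n := by
  induction n with
  | zero => decide
  | succ m ih =>
    by_cases hm : m < 4
    · interval_cases m <;> decide
    · have hm' : 4 ≤ m := by omega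
      have hs3 : (["top", "left_front", "right_front"] : List String).length = 3 := rfl
      have ht1 : (["top", "left_front", "right_front"] : List String).length ≤ m + 1 := by omega
      have ht2 : (["top", "left_front", "right_front"] : List String).length ≤ m := by omega
      have hA : pvA (m + 1) = pvA m ++ ["aux_view_" ++ PySem.Int.toStr ((m : Int) - 3 + 1)] := by
        simp only [pvA, PySem.List.foldl_append_singleton_eq_map, hs3,
          PySem.List.slice_to_natCast]
        rw [if_pos (by push_cast; omega), if_pos (by push_cast; omega),
          List.take_of_length_le ht1, List.take_of_length_le ht2]
        have hr : PySem.List.pyRange ((3 : Nat) : Int) (((m + 1 : Nat)) : Int) 1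
            = PySem.List.pyRange ((3 : Nat) : Int) ((m : Nat) : Int) 1 ++ [((m : Nat) : Int)] := by
          push_cast
          exact PySem.List.pyRange_one_succ_right (by omega)
        rw [hr, List.map_append, List.append_assoc]
        norm_num
      rw [hA, pvB_snoc m (by omega), ih]

theorem pv_main (images_b64 : Option (List String)) :
    view_ids_from_images_py images_b64 = view_ids_from_images_py_alt images_b64 := by
  cases images_b64 with
  | none => rfl
  | some imgs =>
    simp only [view_ids_from_images_py, view_ids_from_images_py_alt]
    by_cases h : imgs.length = 0
    · simp [h]
    · simp only [h]
      rw [pvFold_eq_pvW imgs ["top", "left_front", "right_front"] 1 [], List.nil_append]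
      exact pvA_eq_pvB imgs.length

-- ===== VERDICT (by name: the statement is the Claim_ definition above) =====
theorem view_ids_from_images_py_spec : Claim_equal_view_ids_from_images_py := by
  intro images_b64 _
  exact pv_main images_b64
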